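-- pv_equiv track=rewrite | github.com/MenNianShi/leetcode-python | 哈希/290.单词规律.py | helper
-- ===== SOURCE A (Python) =====
-- def helper(s,t):
--     a = {}
--     n = len(s)
--     m = len(t)
--     if n!=m:
--         return False
--     i = 0
--     while i < n:
--         if s[i] not in a:
--             a[s[i]] = t[i]
--         else:
--             if a[s[i]] != t[i]:
--                 return False
--         i+=1
--     return True
-- ===== SOURCE B (Python) =====
-- def helper(s, t):
--     if len(s) != len(t):
--         return False
--     return len(set(zip(s, t))) == len(set(s))
-- ===== Notes on version B (the rewrite author's own statement) =====
-- stated objective: idiomatic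
-- what changed: Replaces the incremental dict-building index loop with a whole-input set-cardinality comparison: after the length guard, the mapping is consistent iff the set of (s-char, t-char) pairs has as many elements as the set of s-chars.
import Mathlib
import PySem

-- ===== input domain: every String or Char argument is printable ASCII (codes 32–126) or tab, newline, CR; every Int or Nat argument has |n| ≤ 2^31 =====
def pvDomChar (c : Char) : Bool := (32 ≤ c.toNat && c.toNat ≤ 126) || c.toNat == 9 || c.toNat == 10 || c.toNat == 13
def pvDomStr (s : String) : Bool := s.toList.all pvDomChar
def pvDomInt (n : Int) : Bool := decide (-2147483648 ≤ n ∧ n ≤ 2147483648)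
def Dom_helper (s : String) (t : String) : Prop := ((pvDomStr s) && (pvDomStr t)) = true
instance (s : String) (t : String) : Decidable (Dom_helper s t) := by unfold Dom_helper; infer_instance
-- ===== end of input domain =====

-- B replaces A's incremental dict-building scan with a length guard plus a set-cardinality
-- comparison (len(set(zip(s,t))) == len(set(s))) — same cost, more idiomatic.

-- ===== PORT A =====
-- A's 'while i < n' walks s and t in lockstep; ported as simultaneous structural recursion
-- over the two character lists with the dict 'a' as accumulator.
def helperLoop (cs : List Char) (ds : List Char) (a : PySem.Dict Char Char) : Bool :=
  match cs, ds with
  | [], _ => true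
  | _ :: _, [] => true   -- unreachable: the length guard ensures the lists run out together
  | c :: cs', d :: ds' =>
    match a.get? c with
    | none => helperLoop cs' ds' (a.insert c d)
    | some v => if v = d then helperLoop cs' ds' a else false

def helper (s : String) (t : String) : Bool :=
  let a : PySem.Dict Char Char := PySem.Dict.empty
  let n := PySem.Str.len s
  let m := PySem.Str.len t
  if n ≠ m then false
  else helperLoop s.toList t.toList a

-- ===== PORT B =====
def helper_alt (s : String) (t : String) : Bool :=
  if PySem.Str.len s ≠ PySem.Str.len t then false
  else PySem.Set.len (PySem.Set.ofList (s.toList.zip t.toList)) == PySem.Set.len (PySem.Set.ofList s.toList)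

-- ===== PRECONDITION & SPEC =====
def Spec_helper (s : String) (t : String) (out : Bool) : Prop := out = helper_alt s t
instance (s : String) (t : String) (out : Bool) : Decidable (Spec_helper s t out) := by unfold Spec_helper; infer_instance

-- ===== CLAIM (what is proved, stated in full; the proofs are below) =====
def Claim_equal_helper : Prop := ∀ (s : String) (t : String), Dom_helper s t → Spec_helper s t (helper s t)

-- ===== LEMMAS AND PROOFS =====

-- The mapping condition both programs decide: each key occurring in l gets one value.
def KeyFun (l : List (Char × Char)) : Prop :=
  ∀ p ∈ l, ∀ q ∈ l, p.1 = q.1 → p.2 = q.2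

theorem keyfun_perm {l l' : List (Char × Char)} (h : ∀ p, p ∈ l ↔ p ∈ l') :
    KeyFun l ↔ KeyFun l' := by
  unfold KeyFun
  constructor <;> intro hf p hp q hq he
  · exact hf p ((h p).2 hp) q ((h q).2 hq) he
  · exact hf p ((h p).1 hp) q ((h q).1 hq) he

theorem keyfun_of_nodup_keys (a : PySem.Dict Char Char) (h : a.keys.Nodup) :
    KeyFun a.items := by
  intro p hp q hq he
  have := List.inj_on_of_nodup_map (f := Prod.fst) (l := a.items) h hp hq he
  simp [this]

theorem helperLoop_iff (cs ds : List Char) (a : PySem.Dict Char Char)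
    (h : a.keys.Nodup) :
    helperLoop cs ds a = true ↔ KeyFun (a.items ++ cs.zip ds) := by
  induction cs generalizing ds a with
  | nil =>
    simp only [helperLoop, List.zip_nil_left, List.append_nil]
    simp only [true_iff]
    exact keyfun_of_nodup_keys a h
  | cons c cs' ih =>
    cases ds with
    | nil =>
      simp only [helperLoop, List.zip_nil_right, List.append_nil, true_iff]
      exact keyfun_of_nodup_keys a h
    | cons d ds' =>
      simp only [helperLoop, List.zip_cons_cons]
      cases hg : a.get? c with
      | none =>
        have hc : a.contains c = false := (PySem.Dict.get?_eq_none_iff_contains a c).1 hg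
        have hck : c ∉ a.keys := by
          intro hm
          rw [← PySem.Dict.contains_iff_mem_keys] at hm
          simp [hc] at hm
        rw [ih ds' (a.insert c d) (by
          rw [PySem.Dict.keys_insert_of_not_contains a d hc]
          exact List.Nodup.append h (List.nodup_singleton c) (by simpa using hck))]
        apply keyfun_perm
        intro p
        rw [PySem.Dict.items_insert_of_not_contains a d hc]
        simp
      | some v =>
        have hmem : (c, v) ∈ a.items := PySem.Dict.mem_items_of_get?_eq_some a hg
        by_cases hv : v = d
        · subst hv
          simp only [if_true]
          rw [ih ds' a h]
          apply keyfun_perm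
          intro p
          simp only [List.mem_append, List.mem_cons]
          constructor
          · rintro (hp | hp) ; exact Or.inl hp; exact Or.inr (Or.inr hp)
          · rintro (hp | hp | hp)
            · exact Or.inl hp
            · exact Or.inl (hp ▸ hmem)
            · exact Or.inr hp
        · simp only [if_neg hv, Bool.false_eq_true, false_iff]
          intro hf
          exact hv (hf (c, v) (List.mem_append_left _ hmem) (c, d)
            (List.mem_append_right _ (List.mem_cons_self)) rfl)

-- B's cardinality test decides KeyFun of the zipped list.
theorem set_len_iff (l : List (Char × Char)) :
    (PySem.Set.ofList l).length = (PySem.Set.ofList (l.map Prod.fst)).length ↔ KeyFun l := by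
  set S := PySem.Set.ofList l with hS
  set K := PySem.Set.ofList (l.map Prod.fst) with hK
  have hSn : S.Nodup := PySem.Set.nodup_ofList l
  have hKn : K.Nodup := PySem.Set.nodup_ofList _
  have hmemS : ∀ p, p ∈ S ↔ p ∈ l := fun p => PySem.Set.mem_ofList _ _
  have hmemK : ∀ c, c ∈ K ↔ c ∈ l.map Prod.fst := fun c => PySem.Set.mem_ofList _ _
  have hmemM : ∀ c, c ∈ S.map Prod.fst ↔ c ∈ K := by
    intro c
    rw [hmemK]
    simp only [List.mem_map]
    constructor <;> rintro ⟨p, hp, rfl⟩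
    · exact ⟨p, (hmemS p).1 hp, rfl⟩
    · exact ⟨p, (hmemS p).2 hp, rfl⟩
  constructor
  · -- lengths equal → KeyFun
    intro hlen p hp q hq he
    have hsub : K.Subperm (S.map Prod.fst) :=
      List.Nodup.subperm hKn (fun c hc => (hmemM c).2 hc)
    have hperm : K.Perm (S.map Prod.fst) :=
      List.Subperm.perm_of_length_le hsub (by simp [hlen])
    have hnod : (S.map Prod.fst).Nodup := (List.Perm.nodup_iff hperm).1 hKn
    have hinj := List.inj_on_of_nodup_map (f := Prod.fst) (l := S) hnod
    have : p = q := hinj ((hmemS p).2 hp) ((hmemS q).2 hq) he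
    simp [this]
  · -- KeyFun → lengths equal
    intro hf
    have hinj : ∀ p ∈ S, ∀ q ∈ S, p.1 = q.1 → p = q := by
      intro p hp q hq he
      have := hf p ((hmemS p).1 hp) q ((hmemS q).1 hq) he
      exact Prod.ext he this
    have hnod : (S.map Prod.fst).Nodup := List.Nodup.map_on hinj hSn
    have hperm : (S.map Prod.fst).Perm K :=
      (List.perm_ext_iff_of_nodup hnod hKn).2 hmemM
    have := List.Perm.length_eq hperm
    simpa using this

theorem map_fst_zip_of_len {α β : Type} (cs : List α) (ds : List β)
    (h : cs.length = ds.length) : (cs.zip ds).map Prod.fst = cs := by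
  rw [List.map_fst_zip]
  omega

-- ===== VERDICT (by name: the statement is the Claim_ definition above) =====
theorem helper_spec : Claim_equal_helper := by
  intro s t _
  unfold Spec_helper helper helper_alt
  show (if PySem.Str.len s ≠ PySem.Str.len t then false
        else helperLoop s.toList t.toList PySem.Dict.empty) = _
  by_cases hlen : PySem.Str.len s = PySem.Str.len t
  · rw [if_neg (not_not_intro hlen), if_neg (not_not_intro hlen)]
    have hl : s.toList.length = t.toList.length := by
      have := hlen
      rw [PySem.Str.len_eq, PySem.Str.len_eq] at this
      exact_mod_cast this
    have h2 := set_len_iff (s.toList.zip t.toList)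
    rw [map_fst_zip_of_len s.toList t.toList hl] at h2
    apply Bool.eq_iff_iff.mpr
    rw [helperLoop_iff s.toList t.toList PySem.Dict.empty PySem.Dict.nodup_keys_empty]
    have he : (PySem.Dict.empty : PySem.Dict Char Char).items = [] := rfl
    rw [he, List.nil_append]
    simp only [PySem.Set.len, beq_iff_eq, Int.natCast_inj]
    exact h2.symm
  · rw [if_pos hlen, if_pos hlen]
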